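-- pv_equiv track=rewrite | github.com/pwrwpw/Algorithm | 프로그래머스/3/77486. 다단계 칫솔 판매/다단계 칫솔 판매.py | solution
-- ===== SOURCE A (Python) =====
-- def solution(enroll, referral, seller, amount):
--     recommends = [-1 for i in range(len(enroll))]
--     result = [0 for i in range(len(enroll))]
--     dict_name = {}
--
--     idx = 0
--     for name in enroll:
--         dict_name[name] = idx
--         idx += 1
--
--     for i in range(len(referral)):
--         if referral[i] != '-':
--             target = dict_name[referral[i]]
--             recommends[i] = target
--
--     for i in range(len(seller)):
--         start = dict_name[seller[i]]
--         money = amount[i] * 100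
--         tax_calculator(recommends, result, money, start)
--
--     return result
--
-- def tax_calculator(follow, result, money, start):
--     tax = int(money / 10)
--
--     result[start] += money - tax
--
--     if follow[start] == -1 or tax == 0:
--         return
--     else:
--         tax_calculator(follow, result, tax, follow[start])
-- ===== SOURCE B (Python) =====
-- def solution(enroll, referral, seller, amount):
--     # Index-keyed dicts throughout: no recommends array, no result-list mutation,
--     # no recursive helper; an inlined while-loop climbs the chain into an earnings dict.
--     idx = {name: i for i, name in enumerate(enroll)}
--     parent = {i: idx[boss] for i, boss in enumerate(referral) if boss != '-'}
--     earned = {}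
--     for name, amt in zip(seller, amount):
--         node, money = idx[name], amt * 100
--         while True:
--             tax = int(money / 10)
--             earned[node] = earned.get(node, 0) + money - tax
--             nxt = parent.get(node)
--             if nxt is None or tax == 0:
--                 break
--             node, money = nxt, tax
--     return [earned.get(i, 0) for i in range(len(enroll))]
-- ===== Notes on version B (the rewrite author's own statement) =====
-- stated objective: alternative
-- what changed: A's recommends array, in-place result list and recursive tax_calculator are replaced by dict comprehensions (name->index, index->parent-index) and an inlined while-loop that climbs the chain into an earnings dict, read off by a final comprehension over range(len(enroll)).
import Mathlib
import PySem

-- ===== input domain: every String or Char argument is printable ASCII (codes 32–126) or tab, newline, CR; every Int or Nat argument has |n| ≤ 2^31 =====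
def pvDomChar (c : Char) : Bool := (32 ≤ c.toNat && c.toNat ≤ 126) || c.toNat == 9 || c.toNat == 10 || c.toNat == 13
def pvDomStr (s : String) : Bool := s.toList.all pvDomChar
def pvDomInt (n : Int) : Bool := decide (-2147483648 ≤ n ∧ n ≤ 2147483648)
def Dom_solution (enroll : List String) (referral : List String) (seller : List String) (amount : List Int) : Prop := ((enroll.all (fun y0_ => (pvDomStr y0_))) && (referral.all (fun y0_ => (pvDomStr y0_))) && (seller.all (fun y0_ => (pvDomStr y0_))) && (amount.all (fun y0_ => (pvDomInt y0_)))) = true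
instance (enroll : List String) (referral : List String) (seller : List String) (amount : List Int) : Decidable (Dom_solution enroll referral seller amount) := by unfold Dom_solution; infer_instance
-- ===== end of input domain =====

-- B replaces A's recommends array, in-place result list and recursive tax_calculator by dict
-- comprehensions (name→index, index→parent-index) and an inlined while-loop climbing the chain
-- into an earnings dict, read off by a final comprehension over range(len(enroll))
-- (objective: alternative decomposition, same cost).

-- ===== PORT A =====
-- dict_name = {}; idx = 0; for name in enroll: dict_name[name] = idx; idx += 1
def buildDict (enroll : List String) : PySem.Dict String Int :=
  (enroll.foldl (fun (st : PySem.Dict String Int × Int) name => (st.1.insert name st.2, st.2 + 1))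
    (PySem.Dict.empty, 0)).1

-- recommends = [-1]*len(enroll); for i in range(len(referral)): if referral[i] != '-': recommends[i] = dict_name[referral[i]]
-- (dict_name[x] on a missing key is a KeyError, excluded by Pre_; getD 0 is a placeholder there)
def buildRecommends (enroll : List String) (referral : List String) : List Int :=
  (PySem.List.pyRange 0 referral.length 1).foldl (fun rec i =>
      if PySem.List.pyGetD referral i "" ≠ "-" then
        PySem.List.pySetD rec i ((buildDict enroll).getD (PySem.List.pyGetD referral i "") 0)
      else rec)
    (List.replicate enroll.length (-1 : Int))

-- tax = int(money/10): float truncation = exact trunc-division for |money| < 2^53, guaranteed by Dom (|amount| ≤ 2^31).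
-- The recursion is run on the fuel money.natAbs + 1, which strictly exceeds the number of recursive
-- calls (each call passes tax with tax.natAbs < money.natAbs and tax ≠ 0), so the 0-fuel branch is never reached.
def taxCalcFuel (fuel : Nat) (follow : List Int) (result : List Int) (money : Int) (start : Int) : List Int :=
  match fuel with
  | 0 => result
  | fuel + 1 =>
    if PySem.List.pyGetD follow start (-1) = -1 ∨ PySem.Int.truncdiv money 10 = 0 then
      PySem.List.pySetD result start
        (PySem.List.pyGetD result start 0 + (money - PySem.Int.truncdiv money 10))
    else
      taxCalcFuel fuel follow
        (PySem.List.pySetD result start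
          (PySem.List.pyGetD result start 0 + (money - PySem.Int.truncdiv money 10)))
        (PySem.Int.truncdiv money 10) (PySem.List.pyGetD follow start (-1))

def taxCalculator (follow : List Int) (result : List Int) (money : Int) (start : Int) : List Int :=
  taxCalcFuel (money.natAbs + 1) follow result money start

def solution (enroll : List String) (referral : List String) (seller : List String) (amount : List Int) : List Int :=
  (PySem.List.pyRange 0 seller.length 1).foldl (fun res i =>
      taxCalculator (buildRecommends enroll referral) res (PySem.List.pyGetD amount i 0 * 100)
        ((buildDict enroll).getD (PySem.List.pyGetD seller i "") 0))
    (List.replicate enroll.length (0 : Int))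

-- ===== PORT B =====
-- idx = {name: i for i, name in enumerate(enroll)}
def idxDict (enroll : List String) : PySem.Dict String Int :=
  (PySem.List.enumerate enroll 0).foldl (fun d p => d.insert p.2 p.1) PySem.Dict.empty

-- parent = {i: idx[boss] for i, boss in enumerate(referral) if boss != '-'}
-- (idx[boss] on a missing key is a KeyError, excluded by Pre_; getD 0 is a placeholder there)
def parentDict (enroll : List String) (referral : List String) : PySem.Dict Int Int :=
  (PySem.List.enumerate referral 0).foldl
    (fun d p => if p.2 ≠ "-" then d.insert p.1 ((idxDict enroll).getD p.2 0) else d)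
    PySem.Dict.empty

-- the inlined while-loop climbing the chain into the earnings dict
-- (tax = int(money/10) is exact trunc-division on Dom; fuel money.natAbs + 1 strictly exceeds the
-- number of iterations, as on the A side, so the 0-fuel branch is never reached)
def climbFuel (fuel : Nat) (parent : PySem.Dict Int Int) (earned : PySem.Dict Int Int)
    (node : Int) (money : Int) : PySem.Dict Int Int :=
  match fuel with
  | 0 => earned
  | fuel + 1 =>
    match parent.get? node with
    | none => earned.insert node (earned.getD node 0 + (money - PySem.Int.truncdiv money 10))
    | some nxt =>
      if PySem.Int.truncdiv money 10 = 0 then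
        earned.insert node (earned.getD node 0 + (money - PySem.Int.truncdiv money 10))
      else
        climbFuel fuel parent
          (earned.insert node (earned.getD node 0 + (money - PySem.Int.truncdiv money 10)))
          nxt (PySem.Int.truncdiv money 10)

def solution_alt (enroll : List String) (referral : List String) (seller : List String) (amount : List Int) : List Int :=
  let earned := (seller.zip amount).foldl
    (fun e p => climbFuel ((p.2 * 100).natAbs + 1) (parentDict enroll referral) e
      ((idxDict enroll).getD p.1 0) (p.2 * 100))
    PySem.Dict.empty
  (PySem.List.pyRange 0 enroll.length 1).map (fun i => earned.getD i 0)

-- ===== PRECONDITION & SPEC =====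
-- Pre_ excludes exactly the inputs where A raises: a non-'-' referral name or a seller name missing
-- from enroll (KeyError), a non-'-' referral entry at an index ≥ len(enroll) (IndexError on the
-- recommends assignment), and seller longer than amount (IndexError on amount[i]).
def Pre_solution (enroll : List String) (referral : List String) (seller : List String) (amount : List Int) : Prop :=
  (∀ i, i < referral.length → referral.getD i "-" ≠ "-" → referral.getD i "-" ∈ enroll ∧ i < enroll.length) ∧
  (∀ s ∈ seller, s ∈ enroll) ∧ seller.length ≤ amount.length
instance (enroll : List String) (referral : List String) (seller : List String) (amount : List Int) : Decidable (Pre_solution enroll referral seller amount) := by unfold Pre_solution; infer_instance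
def pvWitness_solution : List String × List String × List String × List Int :=
  (["ann", "bob"], ["-", "ann"], ["bob", "bob"], [100, 35])

def Spec_solution (enroll : List String) (referral : List String) (seller : List String) (amount : List Int) (out : List Int) : Prop := out = solution_alt enroll referral seller amount
instance (enroll : List String) (referral : List String) (seller : List String) (amount : List Int) (out : List Int) : Decidable (Spec_solution enroll referral seller amount out) := by unfold Spec_solution; infer_instance

-- ===== CLAIM =====
def Claim_equal_solution : Prop := ∀ (enroll : List String) (referral : List String) (seller : List String) (amount : List Int), Dom_solution enroll referral seller amount → Pre_solution enroll referral seller amount → Spec_solution enroll referral seller amount (solution enroll referral seller amount)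

-- ===== LEMMAS AND PROOFS =====

-- getD at one default equals getD at another while in bounds
theorem getD_default_irrel {α : Type} (l : List α) (j : Nat) (h : j < l.length) (d d' : α) :
    l.getD j d = l.getD j d' := by
  rw [List.getD_eq_getElem _ _ h, List.getD_eq_getElem _ _ h]

-- getD after set
theorem getD_set {α : Type} (l : List α) (i j : Nat) (v d : α) :
    (l.set i v).getD j d = if j = i ∧ i < l.length then v else l.getD j d := by
  simp only [List.getD_eq_getElem?_getD, List.getElem?_set]
  by_cases h1 : i = j
  · subst h1
    by_cases h2 : i < l.length
    · simp [h2]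
    · rw [if_pos rfl, if_neg h2, if_neg (fun h : i = i ∧ i < l.length => h2 h.2),
          List.getElem?_eq_none (by omega : l.length ≤ i)]
  · rw [if_neg h1, if_neg (fun h : j = i ∧ i < l.length => h1 h.1.symm)]

-- A's dict_name loop and B's enumerate comprehension build the SAME dict
theorem buildDict_eq_idxDict_aux (l : List String) :
    ∀ (d : PySem.Dict String Int) (k : Int),
      (l.foldl (fun st name => (st.1.insert name st.2, st.2 + 1)) (d, k)).1
        = (PySem.List.enumerate l k).foldl (fun d p => d.insert p.2 p.1) d := by
  induction l with
  | nil => intro d k; rfl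
  | cons a t ih =>
      intro d k
      rw [PySem.List.enumerate_cons]
      simp only [List.foldl_cons]
      exact ih _ _

theorem buildDict_eq_idxDict (enroll : List String) : buildDict enroll = idxDict enroll :=
  buildDict_eq_idxDict_aux enroll PySem.Dict.empty 0

-- the dict_name fold leaves keys not in the list untouched …
theorem buildDict_fold_not_mem (l : List String) (n : String) (hn : n ∉ l) :
    ∀ (d : PySem.Dict String Int) (k : Int),
      ((l.foldl (fun st name => (st.1.insert name st.2, st.2 + 1)) (d, k)).1).get? n = d.get? n := by
  induction l with
  | nil => intro d k; rfl
  | cons a t ih =>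
      intro d k
      simp only [List.mem_cons, not_or] at hn
      simp only [List.foldl_cons]
      rw [ih hn.2, PySem.Dict.get?_insert_of_ne _ _ hn.1]

-- … and maps each member to SOME index in [k, k + len)
theorem buildDict_fold_mem_range (l : List String) :
    ∀ n ∈ l, ∀ (d : PySem.Dict String Int) (k : Int),
      ∃ v, ((l.foldl (fun st name => (st.1.insert name st.2, st.2 + 1)) (d, k)).1).get? n = some v
        ∧ k ≤ v ∧ v < k + l.length := by
  induction l with
  | nil => intro n hn; cases hn
  | cons a t ih =>
      intro n hn d k
      simp only [List.foldl_cons]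
      by_cases hnt : n ∈ t
      · obtain ⟨v, hv, h1, h2⟩ := ih n hnt (d.insert a k) (k + 1)
        exact ⟨v, hv, by omega, by
          simp only [List.length_cons]
          push_cast
          omega⟩
      · have hna : n = a := by
          rcases List.mem_cons.mp hn with h | h
          · exact h
          · exact absurd h hnt
        subst hna
        rw [buildDict_fold_not_mem t n hnt, PySem.Dict.get?_insert_self]
        exact ⟨k, rfl, le_refl k, by simp only [List.length_cons]; push_cast; omega⟩

theorem buildDict_getD_range (enroll : List String) (n : String) (h : n ∈ enroll) :
    0 ≤ (buildDict enroll).getD n 0 ∧ (buildDict enroll).getD n 0 < (enroll.length : Int) := by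
  obtain ⟨v, hv, h1, h2⟩ := buildDict_fold_mem_range enroll n h PySem.Dict.empty 0
  unfold buildDict
  rw [PySem.Dict.getD_eq_get?_getD, hv]
  simp only [Option.getD_some]
  omega

-- the parent fold only creates keys in [s, s + len) …
theorem parent_fold_lt (g : String → Int) (r : List String) :
    ∀ (s : Int) (d0 : PySem.Dict Int Int) (j : Int), j < s →
      ((PySem.List.enumerate r s).foldl
          (fun d p => if p.2 ≠ "-" then d.insert p.1 (g p.2) else d) d0).get? j = d0.get? j := by
  induction r with
  | nil => intro s d0 j _; rfl
  | cons b t ih =>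
      intro s d0 j hj
      rw [PySem.List.enumerate_cons]
      simp only [List.foldl_cons]
      rw [ih (s + 1) _ j (by omega)]
      by_cases hb : b ≠ "-"
      · rw [if_pos hb, PySem.Dict.get?_insert_of_ne _ _ (by omega : j ≠ s)]
      · rw [if_neg hb]

theorem parent_fold_ge (g : String → Int) (r : List String) :
    ∀ (s : Int) (d0 : PySem.Dict Int Int) (j : Int), s + r.length ≤ j →
      ((PySem.List.enumerate r s).foldl
          (fun d p => if p.2 ≠ "-" then d.insert p.1 (g p.2) else d) d0).get? j = d0.get? j := by
  induction r with
  | nil => intro s d0 j _; rfl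
  | cons b t ih =>
      intro s d0 j hj
      simp only [List.length_cons] at hj
      rw [PySem.List.enumerate_cons]
      simp only [List.foldl_cons]
      rw [ih (s + 1) _ j (by push_cast at hj ⊢; omega)]
      by_cases hb : b ≠ "-"
      · rw [if_pos hb, PySem.Dict.get?_insert_of_ne _ _ (by push_cast at hj; omega : j ≠ s)]
      · rw [if_neg hb]

-- … and at key s + k it holds exactly the filtered value of entry k
theorem parent_fold_at (g : String → Int) (r : List String) :
    ∀ (s : Int) (d0 : PySem.Dict Int Int) (k : Nat), k < r.length →
      ((PySem.List.enumerate r s).foldl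
          (fun d p => if p.2 ≠ "-" then d.insert p.1 (g p.2) else d) d0).get? (s + (k : Int))
        = if r.getD k "" ≠ "-" then some (g (r.getD k "")) else d0.get? (s + (k : Int)) := by
  induction r with
  | nil => intro s d0 k hk; cases hk
  | cons b t ih =>
      intro s d0 k hk
      rw [PySem.List.enumerate_cons]
      simp only [List.foldl_cons]
      cases k with
      | zero =>
          simp only [Nat.cast_zero, add_zero, List.getD_cons_zero]
          rw [parent_fold_lt g t (s + 1) _ s (by omega)]
          by_cases hb : b ≠ "-"
          · rw [if_pos hb, if_pos hb, PySem.Dict.get?_insert_self]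
          · rw [if_neg hb, if_neg hb]
      | succ k =>
          have hcast : s + ((k + 1 : Nat) : Int) = (s + 1) + (k : Int) := by push_cast; ring
          simp only [List.getD_cons_succ]
          rw [hcast, ih (s + 1) _ k (by simpa using hk)]
          by_cases hc : t.getD k "" ≠ "-"
          · rw [if_pos hc, if_pos hc]
          · rw [if_neg hc, if_neg hc]
            by_cases hb : b ≠ "-"
            · rw [if_pos hb, PySem.Dict.get?_insert_of_ne _ _ (by omega : (s + 1) + (k : Int) ≠ s)]
            · rw [if_neg hb]

theorem parentDict_get?_nat (enroll referral : List String) (k : Nat) (hk : k < referral.length) :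
    (parentDict enroll referral).get? (k : Int)
      = if referral.getD k "" ≠ "-" then some ((idxDict enroll).getD (referral.getD k "") 0)
        else none := by
  unfold parentDict
  have h := parent_fold_at (fun b => (idxDict enroll).getD b 0) referral 0 PySem.Dict.empty k hk
  rw [zero_add] at h
  rw [h]
  by_cases hb : referral.getD k "" ≠ "-"
  · rw [if_pos hb, if_pos hb]
  · rw [if_neg hb, if_neg hb]
    rfl

theorem parentDict_get?_none (enroll referral : List String) (j : Int)
    (h : j < 0 ∨ (referral.length : Int) ≤ j) :
    (parentDict enroll referral).get? j = none := by
  unfold parentDict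
  rcases h with h | h
  · rw [parent_fold_lt (fun b => (idxDict enroll).getD b 0) referral 0 PySem.Dict.empty j (by omega)]
    rfl
  · rw [parent_fold_ge (fun b => (idxDict enroll).getD b 0) referral 0 PySem.Dict.empty j (by omega)]
    rfl

-- buildRecommends: the whole prefix fold, with its length invariant
theorem recommends_fold_spec (enroll referral : List String)
    (href : ∀ i, i < referral.length → referral.getD i "-" ≠ "-" → referral.getD i "-" ∈ enroll ∧ i < enroll.length) :
    ∀ k : Nat, k ≤ referral.length →
      (((PySem.List.pyRange 0 (k : Int) 1).foldl (fun rec i =>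
          if PySem.List.pyGetD referral i "" ≠ "-" then
            PySem.List.pySetD rec i ((buildDict enroll).getD (PySem.List.pyGetD referral i "") 0)
          else rec)
        (List.replicate enroll.length (-1 : Int))).length = enroll.length ∧
      ∀ j : Nat,
        ((PySem.List.pyRange 0 (k : Int) 1).foldl (fun rec i =>
          if PySem.List.pyGetD referral i "" ≠ "-" then
            PySem.List.pySetD rec i ((buildDict enroll).getD (PySem.List.pyGetD referral i "") 0)
          else rec)
        (List.replicate enroll.length (-1 : Int))).getD j (-1)
          = if j < k ∧ referral.getD j "" ≠ "-" then (buildDict enroll).getD (referral.getD j "") 0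
            else -1) := by
  intro k
  induction k with
  | zero =>
      intro _
      rw [PySem.List.pyRange_one_eq_nil (by omega)]
      refine ⟨by simp, fun j => ?_⟩
      rw [if_neg (by omega)]
      by_cases hj : j < enroll.length
      · rw [List.getD_eq_getElem _ _ (by simpa using hj)]
        simp
      · rw [List.getD_eq_default _ _ (by simpa using (by omega : enroll.length ≤ j))]
  | succ k ih =>
      intro hk
      obtain ⟨ihlen, ihget⟩ := ih (by omega)
      have hcast : ((k + 1 : Nat) : Int) = (k : Int) + 1 := by push_cast; ring
      rw [hcast, PySem.List.pyRange_one_succ_right (by omega), List.foldl_append, List.foldl_cons,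
          List.foldl_nil]
      have hkr : k < referral.length := by omega
      rw [show PySem.List.pyGetD referral (k : Int) "" = referral.getD k "" from PySem.List.pyGetD_natCast ..]
      by_cases hb : referral.getD k "" ≠ "-"
      · have hkref : referral.getD k "-" ≠ "-" := by
          rwa [getD_default_irrel referral k hkr "-" ""]
        obtain ⟨_, hke⟩ := href k hkr hkref
        rw [if_pos hb, PySem.List.pySetD_natCast]
        refine ⟨by simpa using ihlen, fun j => ?_⟩
        rw [getD_set, ihget j, ihlen]
        by_cases hjk : j = k
        · subst hjk
          rw [if_pos ⟨rfl, hke⟩, if_pos ⟨by omega, hb⟩]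
        · rw [if_neg (fun h => hjk h.1)]
          by_cases hc : j < k ∧ referral.getD j "" ≠ "-"
          · rw [if_pos hc, if_pos ⟨by omega, hc.2⟩]
          · rw [if_neg hc, if_neg (by intro h; exact hc ⟨by omega, h.2⟩)]
      · rw [if_neg hb]
        refine ⟨ihlen, fun j => ?_⟩
        rw [ihget j]
        by_cases hjk : j = k
        · subst hjk
          rw [if_neg (fun h => hb h.2), if_neg (fun h => hb h.2)]
        · by_cases hc : j < k ∧ referral.getD j "" ≠ "-"
          · rw [if_pos hc, if_pos ⟨by omega, hc.2⟩]
          · rw [if_neg hc, if_neg (by intro h; exact hc ⟨by omega, h.2⟩)]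

theorem buildRecommends_getD (enroll referral : List String)
    (href : ∀ i, i < referral.length → referral.getD i "-" ≠ "-" → referral.getD i "-" ∈ enroll ∧ i < enroll.length)
    (j : Nat) :
    (buildRecommends enroll referral).getD j (-1)
      = if j < referral.length ∧ referral.getD j "" ≠ "-" then (buildDict enroll).getD (referral.getD j "") 0
        else -1 :=
  (recommends_fold_spec enroll referral href referral.length (le_refl _)).2 j

-- indexing / updating the range-shaped comprehension list
theorem pySetD_map_pyRange (f : Int → Int) (n j : Int) (h0 : 0 ≤ j) (hn : j < n) (v : Int) :
    PySem.List.pySetD ((PySem.List.pyRange 0 n 1).map f) j v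
      = (PySem.List.pyRange 0 n 1).map (fun i => if i = j then v else f i) := by
  rw [PySem.List.pySetD_of_nonneg _ _ h0]
  apply List.ext_getElem (by simp)
  intro m h1 h2
  rw [List.getElem_set]
  simp only [List.getElem_map, PySem.List.getElem_pyRange_one, zero_add]
  have hm : (m : Int) < n := by
    have := h1
    simp only [List.length_set, List.length_map, PySem.List.length_pyRange_one] at this
    omega
  by_cases hc : j.toNat = m
  · rw [if_pos hc, if_pos (by omega)]
  · rw [if_neg hc, if_neg (by omega)]

-- step equations for climbFuel, once the parent lookup is known
theorem climbFuel_succ_none (f : Nat) (par : PySem.Dict Int Int)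
    (earned : PySem.Dict Int Int) (node : Int) (money : Int)
    (h : par.get? node = none) :
    climbFuel (f + 1) par earned node money
      = earned.insert node (earned.getD node 0 + (money - PySem.Int.truncdiv money 10)) := by
  rw [climbFuel, h]

theorem climbFuel_succ_some (f : Nat) (par : PySem.Dict Int Int)
    (earned : PySem.Dict Int Int) (node : Int) (money : Int) (nxt : Int)
    (h : par.get? node = some nxt) :
    climbFuel (f + 1) par earned node money
      = if PySem.Int.truncdiv money 10 = 0 then
          earned.insert node (earned.getD node 0 + (money - PySem.Int.truncdiv money 10))
        else
          climbFuel f par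
            (earned.insert node (earned.getD node 0 + (money - PySem.Int.truncdiv money 10)))
            nxt (PySem.Int.truncdiv money 10) := by
  rw [climbFuel, h]

-- A's recursive in-place distribution corresponds to B's dict-keyed climb, at every fuel
theorem chain_corr (enroll : List String)
    (rec : List Int) (par : PySem.Dict Int Int)
    (Hrec : ∀ j : Int, 0 ≤ j → j < (enroll.length : Int) →
        PySem.List.pyGetD rec j (-1) = (match par.get? j with | none => -1 | some v => v))
    (Hpar : ∀ j v : Int, par.get? j = some v → 0 ≤ v ∧ v < (enroll.length : Int)) :
    ∀ (fuel : Nat) (node : Int), 0 ≤ node → node < (enroll.length : Int) →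
      ∀ (money : Int) (earned : PySem.Dict Int Int),
      taxCalcFuel fuel rec ((PySem.List.pyRange 0 (enroll.length : Int) 1).map fun i => earned.getD i 0)
          money node
        = (PySem.List.pyRange 0 (enroll.length : Int) 1).map
            fun i => (climbFuel fuel par earned node money).getD i 0 := by
  intro fuel
  induction fuel with
  | zero => intro node _ _ money earned; rfl
  | succ f ih =>
      intro node h0 h1 money earned
      have hset : PySem.List.pySetD
          ((PySem.List.pyRange 0 (enroll.length : Int) 1).map fun i => earned.getD i 0) node
          (PySem.List.pyGetD
            ((PySem.List.pyRange 0 (enroll.length : Int) 1).map fun i => earned.getD i 0) node 0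
            + (money - PySem.Int.truncdiv money 10))
          = (PySem.List.pyRange 0 (enroll.length : Int) 1).map
              fun i => (earned.insert node (earned.getD node 0 + (money - PySem.Int.truncdiv money 10))).getD i 0 := by
        rw [PySem.List.pyGetD_map_pyRange_of_nonneg _ _ _ _ h0 h1,
            pySetD_map_pyRange _ _ _ h0 h1]
        apply List.map_congr_left
        intro i _
        rw [PySem.Dict.getD_insert]
      cases hpar : par.get? node with
      | none =>
          have hr : PySem.List.pyGetD rec node (-1) = -1 := by
            rw [Hrec node h0 h1, hpar]
          rw [taxCalcFuel, climbFuel_succ_none f par earned node money hpar, if_pos (Or.inl hr)]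
          exact hset
      | some nxt =>
          obtain ⟨hv0, hv1⟩ := Hpar node nxt hpar
          have hr : PySem.List.pyGetD rec node (-1) = nxt := by
            rw [Hrec node h0 h1, hpar]
          rw [taxCalcFuel, climbFuel_succ_some f par earned node money nxt hpar]
          by_cases ht : PySem.Int.truncdiv money 10 = 0
          · rw [if_pos (Or.inr ht), if_pos ht]
            exact hset
          · rw [if_neg (by
                rw [hr]
                exact fun hor => hor.elim (fun h => by omega) ht), if_neg ht, hr, hset]
            exact ih nxt hv0 hv1 _ _

-- converting A's index loop over the sellers into a fold over zip(seller, amount)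
theorem pyRange_map_eq_zip (s : List String) (a : List Int) (h : s.length ≤ a.length) :
    (PySem.List.pyRange 0 (s.length : Int) 1).map
        (fun i => (PySem.List.pyGetD s i "", PySem.List.pyGetD a i 0)) = s.zip a := by
  apply List.ext_getElem
  · simp [PySem.List.length_pyRange_one]
    omega
  · intro j h1 h2
    rw [List.getElem_map, PySem.List.getElem_pyRange_one, List.getElem_zip]
    have hj : j < s.length := by
      simpa [PySem.List.length_pyRange_one] using h1
    have hja : j < a.length := by omega
    rw [zero_add]
    rw [show PySem.List.pyGetD s (j : Int) "" = s.getD j "" from PySem.List.pyGetD_natCast ..,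
        show PySem.List.pyGetD a (j : Int) 0 = a.getD j 0 from PySem.List.pyGetD_natCast ..,
        List.getD_eq_getElem _ _ hj, List.getD_eq_getElem _ _ hja]

theorem aFold_eq_zipFold (s : List String) (a : List Int) (h : s.length ≤ a.length)
    (g : List Int → String → Int → List Int) (init : List Int) :
    (PySem.List.pyRange 0 (s.length : Int) 1).foldl
        (fun res i => g res (PySem.List.pyGetD s i "") (PySem.List.pyGetD a i 0)) init
      = (s.zip a).foldl (fun res p => g res p.1 p.2) init := by
  rw [← pyRange_map_eq_zip s a h, List.foldl_map]

-- the seller loop, element by element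
theorem zip_fold_corr (enroll referral : List String)
    (href : ∀ i, i < referral.length → referral.getD i "-" ≠ "-" → referral.getD i "-" ∈ enroll ∧ i < enroll.length) :
    ∀ (ps : List (String × Int)), (∀ p ∈ ps, p.1 ∈ enroll) →
      ∀ (earned : PySem.Dict Int Int),
      ps.foldl (fun res p =>
          taxCalculator (buildRecommends enroll referral) res (p.2 * 100)
            ((buildDict enroll).getD p.1 0))
        ((PySem.List.pyRange 0 (enroll.length : Int) 1).map fun i => earned.getD i 0)
        = (PySem.List.pyRange 0 (enroll.length : Int) 1).map fun i =>
            (ps.foldl (fun e p =>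
                climbFuel ((p.2 * 100).natAbs + 1) (parentDict enroll referral) e
                  ((idxDict enroll).getD p.1 0) (p.2 * 100))
              earned).getD i 0 := by
  have Hpar : ∀ j v : Int, (parentDict enroll referral).get? j = some v →
      0 ≤ v ∧ v < (enroll.length : Int) := by
    intro j v hj
    by_cases hrange : 0 ≤ j ∧ j < (referral.length : Int)
    · have hk : j = ((j.toNat : Nat) : Int) := by omega
      have hkr : j.toNat < referral.length := by omega
      rw [hk, parentDict_get?_nat enroll referral j.toNat hkr] at hj
      by_cases hb : referral.getD j.toNat "" ≠ "-"
      · rw [if_pos hb] at hj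
        cases hj
        have hkref : referral.getD j.toNat "-" ≠ "-" := by
          rwa [getD_default_irrel referral _ hkr "-" ""]
        obtain ⟨hmem, _⟩ := href j.toNat hkr hkref
        rw [getD_default_irrel referral _ hkr "-" ""] at hmem
        rw [← buildDict_eq_idxDict]
        exact buildDict_getD_range enroll _ hmem
      · rw [if_neg hb] at hj
        cases hj
    · rw [parentDict_get?_none enroll referral j (by omega)] at hj
      cases hj
  have Hrec : ∀ j : Int, 0 ≤ j → j < (enroll.length : Int) →
      PySem.List.pyGetD (buildRecommends enroll referral) j (-1)
        = (match (parentDict enroll referral).get? j with | none => -1 | some v => v) := by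
    intro j h0 h1
    have hk : j = ((j.toNat : Nat) : Int) := by omega
    rw [hk, show PySem.List.pyGetD (buildRecommends enroll referral) ((j.toNat : Nat) : Int) (-1)
          = (buildRecommends enroll referral).getD j.toNat (-1) from PySem.List.pyGetD_natCast ..,
        buildRecommends_getD enroll referral href j.toNat]
    by_cases hkr : j.toNat < referral.length
    · rw [parentDict_get?_nat enroll referral j.toNat hkr]
      by_cases hb : referral.getD j.toNat "" ≠ "-"
      · rw [if_pos ⟨hkr, hb⟩, if_pos hb, ← buildDict_eq_idxDict]
      · rw [if_neg (fun h => hb h.2), if_neg hb]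
    · rw [if_neg (fun h => hkr h.1),
          parentDict_get?_none enroll referral _ (Or.inr (by omega))]
  intro ps
  induction ps with
  | nil => intro _ earned; rfl
  | cons p t ih =>
      intro hmem earned
      have hp1 : p.1 ∈ enroll := hmem p List.mem_cons_self
      obtain ⟨hs0, hs1⟩ := buildDict_getD_range enroll p.1 hp1
      simp only [List.foldl_cons]
      unfold taxCalculator
      rw [chain_corr enroll _ _ Hrec Hpar _ _ hs0 hs1 (p.2 * 100) earned,
          show (buildDict enroll).getD p.1 0 = (idxDict enroll).getD p.1 0 from by
            rw [buildDict_eq_idxDict]]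
      exact ih (fun q hq => hmem q (List.mem_cons_of_mem _ hq)) _

-- ===== VERDICT =====
theorem solution_spec : Claim_equal_solution := by
  intro enroll referral seller amount _ hpre
  obtain ⟨href, hsel, hlen⟩ := hpre
  show solution enroll referral seller amount = solution_alt enroll referral seller amount
  have hzip : ∀ p ∈ seller.zip amount, p.1 ∈ enroll := fun p hp => hsel p.1 (List.of_mem_zip hp).1
  have hinit : (List.replicate enroll.length (0 : Int))
      = (PySem.List.pyRange 0 (enroll.length : Int) 1).map
          (fun i => (PySem.Dict.empty : PySem.Dict Int Int).getD i 0) := by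
    have h0 : (fun i : Int => (PySem.Dict.empty : PySem.Dict Int Int).getD i 0)
        = fun _ => (0 : Int) := rfl
    rw [h0, List.map_const', PySem.List.length_pyRange_one]
    simp
  refine Eq.trans (aFold_eq_zipFold seller amount hlen
    (fun res s v => taxCalculator (buildRecommends enroll referral) res (v * 100)
      ((buildDict enroll).getD s 0)) (List.replicate enroll.length (0 : Int))) ?_
  rw [hinit]
  exact zip_fold_corr enroll referral href (seller.zip amount) hzip PySem.Dict.empty
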